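-- pv_equiv track=rewrite | github.com/jere-mie/bulletin-scraper | bulletin_scraper/intentions.py | _merge_intention_lines
-- ===== SOURCE A (Python) =====
-- from typing import Any
--
-- def _merge_intention_lines(lines: list[dict[str, Any]]) -> list[dict[str, Any]]:
--     merged: dict[tuple[str, str | None], dict[str, Any]] = {}
--     for line in lines:
--         intention_for = str(line.get("for") or "").strip()
--         intention_by = line.get("by")
--         key = (intention_for.casefold(), str(intention_by or "").strip().casefold() or None)
--         existing = merged.get(key)
--         if existing is None:
--             merged[key] = {"for": intention_for, "by": intention_by}
--             continue
--         if not existing.get("by") and intention_by: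
--             merged[key] = {"for": intention_for, "by": intention_by}
--     return list(merged.values())
-- ===== SOURCE B (Python) =====
-- def _merge_intention_lines(lines):
--     # group lines by normalized key, then pick per group: first truthy-'by' line, else first line
--     groups = {}
--     for line in lines:
--         intention_for = str(line.get("for") or "").strip()
--         key = (intention_for.casefold(), str(line.get("by") or "").strip().casefold() or None)
--         groups.setdefault(key, []).append((intention_for, line.get("by")))
--     result = []
--     for bucket in groups.values():
--         chosen = next((p for p in bucket if p[1]), bucket[0])
--         result.append({"for": chosen[0], "by": chosen[1]})
--     return result
-- ===== Notes on version B (the rewrite author's own statement) =====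
-- stated objective: alternative
-- what changed: B first groups all lines into per-key buckets (one grouping pass), then selects each bucket's representative (first line with a truthy 'by', else the bucket's first line) in a second pass, instead of A's single pass that conditionally overwrites a merged entry per key.
import Mathlib
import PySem

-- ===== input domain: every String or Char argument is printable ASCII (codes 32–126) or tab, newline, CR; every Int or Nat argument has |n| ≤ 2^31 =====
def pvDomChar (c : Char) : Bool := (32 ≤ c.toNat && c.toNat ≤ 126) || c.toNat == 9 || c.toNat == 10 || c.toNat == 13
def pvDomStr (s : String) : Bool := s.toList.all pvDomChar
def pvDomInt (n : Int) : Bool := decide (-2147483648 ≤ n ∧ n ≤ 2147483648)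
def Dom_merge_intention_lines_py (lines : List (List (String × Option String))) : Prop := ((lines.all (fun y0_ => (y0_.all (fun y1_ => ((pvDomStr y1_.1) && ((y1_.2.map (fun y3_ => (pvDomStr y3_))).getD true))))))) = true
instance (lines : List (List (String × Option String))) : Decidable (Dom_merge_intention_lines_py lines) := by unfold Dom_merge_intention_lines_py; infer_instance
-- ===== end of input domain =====

-- B groups lines by the normalized key first and then selects each group's representative
-- (first truthy-'by' line, else the first line): a different decomposition, same values (objective: alternative).

-- ===== PORT A =====
-- line.get(k): missing key or stored None both give none
def pvAGet (line : List (String × Option String)) (k : String) : Option String :=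
  ((PySem.Dict.mk line).get? k).join

-- Python truthiness of an Optional[str]
def pvATruthy (o : Option String) : Bool := o.getD "" ≠ ""

-- one iteration of A's loop over `merged` (casefold = Str.lower: exact on the ASCII domain)
def pvAStep (merged : PySem.Dict (String × Option String) (List (String × Option String)))
    (line : List (String × Option String)) :
    PySem.Dict (String × Option String) (List (String × Option String)) :=
  let intention_for := PySem.Str.strip ((pvAGet line "for").getD "")
  let intention_by := pvAGet line "by"
  let byNorm := PySem.Str.lower (PySem.Str.strip (intention_by.getD ""))
  let key := (PySem.Str.lower intention_for, if byNorm = "" then none else some byNorm)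
  match merged.get? key with
  | none => merged.insert key [("for", some intention_for), ("by", intention_by)]
  | some existing =>
      if !pvATruthy ((PySem.Dict.mk existing).get? "by").join && pvATruthy intention_by then
        merged.insert key [("for", some intention_for), ("by", intention_by)]
      else merged

def merge_intention_lines_py (lines : List (List (String × Option String))) : List (List (String × Option String)) :=
  (lines.foldl pvAStep PySem.Dict.empty).values

-- ===== PORT B =====
-- line.get(k) for B's side
def pvBGet (line : List (String × Option String)) (k : String) : Option String :=
  ((PySem.Dict.mk line).get? k).join

def pvBTruthy (o : Option String) : Bool := o.getD "" ≠ ""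

-- the (intention_for, raw by) pair of a line
def pvBNorm (line : List (String × Option String)) : String × Option String :=
  (PySem.Str.strip ((pvBGet line "for").getD ""), pvBGet line "by")

-- the normalized grouping key of such a pair (casefold = Str.lower: exact on the ASCII domain)
def pvBKey (p : String × Option String) : String × Option String :=
  (PySem.Str.lower p.1,
   let n := PySem.Str.lower (PySem.Str.strip (p.2.getD ""))
   if n = "" then none else some n)

def merge_intention_lines_py_alt (lines : List (List (String × Option String))) : List (List (String × Option String)) :=
  let groups := lines.foldl
    (fun g line =>
      let p := pvBNorm line
      g.modify (pvBKey p) [] (· ++ [p]))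
    PySem.Dict.empty
  groups.values.map (fun bucket =>
    let chosen := (bucket.find? (fun q => pvBTruthy q.2)).getD (bucket.headD ("", none))
    [("for", some chosen.1), ("by", chosen.2)])

-- ===== PRECONDITION & SPEC =====
def Spec_merge_intention_lines_py (lines : List (List (String × Option String))) (out : List (List (String × Option String))) : Prop := out = merge_intention_lines_py_alt lines
instance (lines : List (List (String × Option String))) (out : List (List (String × Option String))) : Decidable (Spec_merge_intention_lines_py lines out) := by unfold Spec_merge_intention_lines_py; infer_instance

-- ===== CLAIM (what is proved, stated in full; the proofs are below) =====
def Claim_equal_merge_intention_lines_py : Prop := ∀ (lines : List (List (String × Option String))), Dom_merge_intention_lines_py lines → Spec_merge_intention_lines_py lines (merge_intention_lines_py lines)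

-- ===== LEMMAS AND PROOFS =====

-- B's per-bucket representative
def pvChoose (bucket : List (String × Option String)) : String × Option String :=
  (bucket.find? (fun q => pvBTruthy q.2)).getD (bucket.headD ("", none))

-- the output dict rendered from a representative
def pvRender (p : String × Option String) : List (String × Option String) :=
  [("for", some p.1), ("by", p.2)]

-- A's merged dict, described from B's groups
def pvMapped (l : List ((String × Option String) × List (String × Option String))) :
    List ((String × Option String) × List (String × Option String)) :=
  l.map (fun kv => (kv.1, pvRender (pvChoose kv.2)))

-- pvATruthy and pvBTruthy are the same predicate
theorem pvTruthy_eq : pvATruthy = pvBTruthy := rfl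

theorem pvChoose_of_find?_eq_some {bucket : List (String × Option String)} {q : String × Option String}
    (h : bucket.find? (fun q => pvBTruthy q.2) = some q) : pvChoose bucket = q := by
  simp [pvChoose, h]

theorem pvChoose_of_find?_eq_none {bucket : List (String × Option String)}
    (h : bucket.find? (fun q => pvBTruthy q.2) = none) : pvChoose bucket = bucket.headD ("", none) := by
  simp [pvChoose, h]

theorem pvFind?_eq_none_of_not_truthy {bucket : List (String × Option String)}
    (h : pvBTruthy (pvChoose bucket).2 = false) :
    bucket.find? (fun q => pvBTruthy q.2) = none := by
  cases hf : bucket.find? (fun q => pvBTruthy q.2) with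
  | none => rfl
  | some q =>
      rw [pvChoose_of_find?_eq_some hf] at h
      have := List.find?_some hf
      simp_all

theorem pvFind?_eq_some_of_truthy {bucket : List (String × Option String)}
    (hb : bucket ≠ []) (h : pvBTruthy (pvChoose bucket).2 = true) :
    bucket.find? (fun q => pvBTruthy q.2) = some (pvChoose bucket) := by
  cases hf : bucket.find? (fun q => pvBTruthy q.2) with
  | some q => rw [pvChoose_of_find?_eq_some hf]
  | none =>
      rw [pvChoose_of_find?_eq_none hf] at h
      rw [List.find?_eq_none] at hf
      cases bucket with
      | nil => exact absurd rfl hb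
      | cons a t => exact absurd h (by simpa using hf a (by simp))

theorem pvChoose_singleton (p : String × Option String) : pvChoose [p] = p := by
  by_cases h : pvBTruthy p.2 <;> simp [pvChoose, List.find?, h]

theorem pvChoose_append (bucket : List (String × Option String)) (p : String × Option String)
    (hb : bucket ≠ []) :
    pvChoose (bucket ++ [p]) =
      if pvBTruthy (pvChoose bucket).2 then pvChoose bucket
      else if pvBTruthy p.2 then p else pvChoose bucket := by
  by_cases h : pvBTruthy (pvChoose bucket).2
  · rw [if_pos h]
    apply pvChoose_of_find?_eq_some
    rw [List.find?_append, pvFind?_eq_some_of_truthy hb h]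
    rfl
  · rw [if_neg h]
    have hf := pvFind?_eq_none_of_not_truthy (Bool.eq_false_iff.mpr h)
    by_cases hp : pvBTruthy p.2
    · rw [if_pos hp]
      apply pvChoose_of_find?_eq_some
      rw [List.find?_append, hf]
      simp [List.find?, hp]
    · rw [if_neg hp]
      have hfp : List.find? (fun q => pvBTruthy q.2) [p] = none := by
        simp [List.find?, Bool.eq_false_iff.mpr hp]
      rw [pvChoose_of_find?_eq_none (by rw [List.find?_append, hf, hfp]; rfl),
          pvChoose_of_find?_eq_none hf]
      cases bucket with
      | nil => exact absurd rfl hb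
      | cons a t => rfl

theorem pvGet?_mapped (l : List ((String × Option String) × List (String × Option String)))
    (k : String × Option String) :
    (PySem.Dict.mk (pvMapped l)).get? k
      = ((PySem.Dict.mk l).get? k).map (fun its => pvRender (pvChoose its)) := by
  induction l with
  | nil => rfl
  | cons kv rest ih =>
      obtain ⟨k1, its⟩ := kv
      simp only [pvMapped, List.map_cons] at *
      rw [PySem.Dict.get?_mk_cons, PySem.Dict.get?_mk_cons]
      by_cases h : (k1 == k) <;> simp [h, ih]

theorem pvContains_mapped (l : List ((String × Option String) × List (String × Option String)))
    (k : String × Option String) :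
    (PySem.Dict.mk (pvMapped l)).contains k = (PySem.Dict.mk l).contains k := by
  rw [PySem.Dict.contains_eq_isSome_get?, PySem.Dict.contains_eq_isSome_get?, pvGet?_mapped]
  cases (PySem.Dict.mk l).get? k <;> rfl

theorem pvRender_get_by (p : String × Option String) :
    ((PySem.Dict.mk (pvRender p)).get? "by").join = p.2 := by
  simp [pvRender, PySem.Dict.get?, List.find?]

-- pvAStep, re-expressed through B's helpers (definitionally the same computation)
theorem pvAStep_eq (m : PySem.Dict (String × Option String) (List (String × Option String)))
    (line : List (String × Option String)) :
    pvAStep m line =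
      (match m.get? (pvBKey (pvBNorm line)) with
       | none => m.insert (pvBKey (pvBNorm line)) (pvRender (pvBNorm line))
       | some existing =>
           if !pvATruthy ((PySem.Dict.mk existing).get? "by").join &&
              pvATruthy (pvBNorm line).2 then
             m.insert (pvBKey (pvBNorm line)) (pvRender (pvBNorm line))
           else m) := rfl

-- one step of A on the mapped dict = mapping of one step of B's grouping loop
theorem pvStep_comm (g : PySem.Dict (String × Option String) (List (String × Option String)))
    (line : List (String × Option String))
    (hne : ∀ kv ∈ g.items, kv.2 ≠ ([] : List (String × Option String)))
    (hnd : g.keys.Nodup) :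
    pvAStep (PySem.Dict.mk (pvMapped g.items)) line
      = PySem.Dict.mk (pvMapped ((g.modify (pvBKey (pvBNorm line)) [] (· ++ [pvBNorm line])).items)) := by
  rw [pvAStep_eq, pvTruthy_eq, PySem.Dict.modify, pvGet?_mapped]
  cases hg : (PySem.Dict.mk g.items).get? (pvBKey (pvBNorm line)) with
  | none =>
      simp only [Option.map_none]
      have hgd : g.getD (pvBKey (pvBNorm line)) [] = [] := PySem.Dict.getD_of_get?_eq_none g _ hg
      have hc : g.contains (pvBKey (pvBNorm line)) = false :=
        (PySem.Dict.get?_eq_none_iff_contains g _).mp hg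
      rw [hgd]
      have hcm : (PySem.Dict.mk (pvMapped g.items)).contains (pvBKey (pvBNorm line)) = false := by
        rw [pvContains_mapped]; exact hc
      simp only [PySem.Dict.insert, hcm, hc, Bool.false_eq_true, if_false]
      simp [pvMapped, pvChoose_singleton]
  | some its =>
      have hmem : (pvBKey (pvBNorm line), its) ∈ g.items :=
        PySem.Dict.mem_items_of_get?_eq_some g hg
      have hits : its ≠ [] := hne _ hmem
      have hgd : g.getD (pvBKey (pvBNorm line)) [] = its := PySem.Dict.getD_of_get?_eq_some g _ hg
      have hc : g.contains (pvBKey (pvBNorm line)) = true := by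
        rw [PySem.Dict.contains_eq_isSome_get?, hg]; rfl
      simp only [Option.map_some, pvRender_get_by]
      rw [hgd]
      by_cases hcond : (!pvBTruthy (pvChoose its).2 && pvBTruthy (pvBNorm line).2) = true
      · have hch : pvChoose (its ++ [pvBNorm line]) = pvBNorm line := by
          rw [pvChoose_append its _ hits]
          rw [Bool.and_eq_true, Bool.not_eq_true'] at hcond
          simp [hcond.1, hcond.2]
        have hcm : (PySem.Dict.mk (pvMapped g.items)).contains (pvBKey (pvBNorm line)) = true := by
          rw [pvContains_mapped]; exact hc
        simp only [hcond, if_true]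
        simp only [PySem.Dict.contains, pvMapped] at hcm
        simp [PySem.Dict.insert, hcm, hc, pvMapped, List.map_map]
        intro a b c hmemq
        by_cases h1 : (a, b) = pvBKey (pvBNorm line) <;> simp [h1, hch]
      · have hp : pvBTruthy (pvChoose its).2 = true ∨ pvBTruthy (pvBNorm line).2 = false := by
          revert hcond
          cases hA : pvBTruthy (pvChoose its).2 <;> cases hB : pvBTruthy (pvBNorm line).2 <;> simp
        have hch : pvChoose (its ++ [pvBNorm line]) = pvChoose its := by
          rw [pvChoose_append its _ hits]
          rcases hp with hA | hB
          · simp [hA]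
          · by_cases hA : pvBTruthy (pvChoose its).2 = true
            · simp [hA]
            · simp only [Bool.not_eq_true] at hA
              simp [hA, hB]
        simp only [hcond]
        simp [PySem.Dict.insert, hc, pvMapped, List.map_map]
        intro a b c hmemq
        by_cases h1 : (a, b) = pvBKey (pvBNorm line)
        · have hget := PySem.Dict.get?_of_mem_items g hmemq hnd
          have hgg : g.get? (pvBKey (pvBNorm line)) = some its := hg
          rw [h1, hgg] at hget
          have hq2 : c = its := (Option.some.inj hget).symm
          subst hq2
          simp [h1, hch]
        · simp [h1]

theorem pvInv_ne (g : PySem.Dict (String × Option String) (List (String × Option String)))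
    (p : String × Option String)
    (hne : ∀ kv ∈ g.items, kv.2 ≠ ([] : List (String × Option String))) :
    ∀ kv ∈ (g.modify (pvBKey p) [] (· ++ [p])).items, kv.2 ≠ [] := by
  intro kv h
  rw [PySem.Dict.modify] at h
  rcases (PySem.Dict.mem_items_insert _ _ _ _).mp h with h1 | ⟨h2, _⟩
  · simp [h1]
  · exact hne _ h2

theorem pvInv_nd (g : PySem.Dict (String × Option String) (List (String × Option String)))
    (p : String × Option String) (hnd : g.keys.Nodup) :
    (g.modify (pvBKey p) [] (· ++ [p])).keys.Nodup := by
  rw [PySem.Dict.modify]; exact PySem.Dict.nodup_keys_insert _ _ _ hnd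

theorem pvLoop (lines : List (List (String × Option String))) :
    ∀ g : PySem.Dict (String × Option String) (List (String × Option String)),
    (∀ kv ∈ g.items, kv.2 ≠ ([] : List (String × Option String))) → g.keys.Nodup →
    lines.foldl pvAStep (PySem.Dict.mk (pvMapped g.items)) =
      PySem.Dict.mk (pvMapped ((lines.foldl
        (fun g line => let p := pvBNorm line; g.modify (pvBKey p) [] (· ++ [p])) g).items)) := by
  induction lines with
  | nil => intro g _ _; rfl
  | cons line rest ih =>
      intro g hne hnd
      rw [List.foldl_cons, List.foldl_cons, pvStep_comm g line hne hnd]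
      exact ih _ (pvInv_ne g (pvBNorm line) hne) (pvInv_nd g (pvBNorm line) hnd)

theorem merge_intention_lines_py_spec : Claim_equal_merge_intention_lines_py := by
  intro lines _
  unfold Spec_merge_intention_lines_py merge_intention_lines_py merge_intention_lines_py_alt
  have h2 : lines.foldl pvAStep PySem.Dict.empty =
      PySem.Dict.mk (pvMapped ((lines.foldl
        (fun g line => let p := pvBNorm line; g.modify (pvBKey p) [] (· ++ [p]))
        PySem.Dict.empty).items)) :=
    pvLoop lines PySem.Dict.empty (by intro kv h; simp [PySem.Dict.empty] at h)
      (by simp [PySem.Dict.keys, PySem.Dict.empty])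
  rw [h2]
  simp [PySem.Dict.values, pvMapped, List.map_map, pvRender, pvChoose]
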